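-- pv_equiv track=rewrite | github.com/zhangce/datascope | src/Tools.py | count
-- ===== SOURCE A (Python) =====
-- def count(tupleSet, refTuple, mode, L_t):
--     j = 0
--     if mode==0:
--         for i in range(len(tupleSet)):
--             if tupleSet[i][0] <= refTuple[0] and tupleSet[i][1] == L_t:
--                 j=j+1
--     elif mode == 1:
--         for i in range(len(tupleSet)):
--             if tupleSet[i][0] <= refTuple[0] and tupleSet[i][1] != L_t:
--                 j=j+1
--     return j
-- ===== SOURCE B (Python) =====
-- def count(tupleSet, refTuple, mode, L_t):
--     total = 0
--     freq = {}
--     for t in tupleSet: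
--         if t[0] <= refTuple[0]:
--             total += 1
--             freq[t[1]] = freq.get(t[1], 0) + 1
--     if mode == 0:
--         return freq.get(L_t, 0)
--     if mode == 1:
--         return total - freq.get(L_t, 0)
--     return 0
-- ===== Notes on version B (the rewrite author's own statement) =====
-- stated objective: alternative
-- what changed: Single pass building a label-frequency dict plus a running total of below-threshold tuples, with the mode branch moved entirely after the loop, instead of A's per-mode loops with an in-loop conditional counter.
import Mathlib
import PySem

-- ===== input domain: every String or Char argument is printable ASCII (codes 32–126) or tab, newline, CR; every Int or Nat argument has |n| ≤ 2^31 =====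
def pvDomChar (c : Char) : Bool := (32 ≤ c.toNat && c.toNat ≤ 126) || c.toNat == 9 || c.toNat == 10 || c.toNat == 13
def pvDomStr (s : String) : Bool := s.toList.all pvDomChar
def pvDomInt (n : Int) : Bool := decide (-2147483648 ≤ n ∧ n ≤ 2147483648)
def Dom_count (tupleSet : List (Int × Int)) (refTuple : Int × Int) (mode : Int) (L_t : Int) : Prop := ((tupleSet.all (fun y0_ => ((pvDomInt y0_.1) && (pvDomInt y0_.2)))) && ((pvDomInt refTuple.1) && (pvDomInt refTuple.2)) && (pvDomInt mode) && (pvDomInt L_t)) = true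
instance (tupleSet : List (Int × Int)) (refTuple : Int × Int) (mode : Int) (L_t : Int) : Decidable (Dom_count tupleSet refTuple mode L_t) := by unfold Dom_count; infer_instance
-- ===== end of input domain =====

-- B replaces A's two per-mode counting loops by one pass building a label histogram
-- and a running below-threshold total, branching on mode only after the loop (objective: alternative).

-- ===== PORT A =====
-- literal port of A: j = 0; per-mode index loop over range(len(tupleSet)); return j
def count (tupleSet : List (Int × Int)) (refTuple : Int × Int) (mode : Int) (L_t : Int) : Int :=
  if mode = 0 then
    (PySem.List.pyRange 0 tupleSet.length 1).foldl
      (fun j i =>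
        let t := PySem.List.pyGetD tupleSet i (0, 0)
        if t.1 ≤ refTuple.1 ∧ t.2 = L_t then j + 1 else j) 0
  else if mode = 1 then
    (PySem.List.pyRange 0 tupleSet.length 1).foldl
      (fun j i =>
        let t := PySem.List.pyGetD tupleSet i (0, 0)
        if t.1 ≤ refTuple.1 ∧ t.2 ≠ L_t then j + 1 else j) 0
  else 0

-- ===== PORT B =====
-- literal port of B: one fold over tupleSet carrying (total, freq dict); mode branch after the loop
def count_alt (tupleSet : List (Int × Int)) (refTuple : Int × Int) (mode : Int) (L_t : Int) : Int :=
  let st := tupleSet.foldl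
    (fun (acc : Int × PySem.Dict Int Int) t =>
      if t.1 ≤ refTuple.1 then (acc.1 + 1, acc.2.insert t.2 (acc.2.getD t.2 0 + 1)) else acc)
    (0, PySem.Dict.empty)
  if mode = 0 then st.2.getD L_t 0
  else if mode = 1 then st.1 - st.2.getD L_t 0
  else 0

-- ===== PRECONDITION & SPEC =====
def Spec_count (tupleSet : List (Int × Int)) (refTuple : Int × Int) (mode : Int) (L_t : Int) (out : Int) : Prop := out = count_alt tupleSet refTuple mode L_t
instance (tupleSet : List (Int × Int)) (refTuple : Int × Int) (mode : Int) (L_t : Int) (out : Int) : Decidable (Spec_count tupleSet refTuple mode L_t out) := by unfold Spec_count; infer_instance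

-- ===== CLAIM (what is proved, stated in full; the proofs are below) =====
def Claim_equal_count : Prop := ∀ (tupleSet : List (Int × Int)) (refTuple : Int × Int) (mode : Int) (L_t : Int), Dom_count tupleSet refTuple mode L_t → Spec_count tupleSet refTuple mode L_t (count tupleSet refTuple mode L_t)

-- ===== LEMMAS AND PROOFS =====

-- A's loop counts the tuples satisfying p
theorem foldA_count (l : List (Int × Int)) (p : Int × Int → Prop) [DecidablePred p] :
    ∀ j : Int, l.foldl (fun j t => if p t then j + 1 else j) j
      = j + (l.countP (fun t => decide (p t)) : Int) := by
  induction l with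
  | nil => simp
  | cons t l ih =>
    intro j
    by_cases h : p t <;> simp [h, ih] <;> ring

-- first component of B's fold: number of below-threshold tuples
theorem foldB_fst (r : Int) (l : List (Int × Int)) :
    ∀ (tot : Int) (d : PySem.Dict Int Int),
      (l.foldl (fun (acc : Int × PySem.Dict Int Int) t =>
          if t.1 ≤ r then (acc.1 + 1, acc.2.insert t.2 (acc.2.getD t.2 0 + 1)) else acc)
        (tot, d)).1 = tot + (l.countP (fun t => decide (t.1 ≤ r)) : Int) := by
  induction l with
  | nil => simp
  | cons t l ih =>
    intro tot d
    by_cases h : t.1 ≤ r <;> simp [h, ih] <;> ring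

-- histogram entry of B's fold at L: below-threshold tuples labelled L
theorem foldB_snd (r L : Int) (l : List (Int × Int)) :
    ∀ (tot : Int) (d : PySem.Dict Int Int),
      ((l.foldl (fun (acc : Int × PySem.Dict Int Int) t =>
          if t.1 ≤ r then (acc.1 + 1, acc.2.insert t.2 (acc.2.getD t.2 0 + 1)) else acc)
        (tot, d)).2).getD L 0
      = d.getD L 0 + (l.countP (fun t => decide (t.1 ≤ r ∧ t.2 = L)) : Int) := by
  induction l with
  | nil => simp
  | cons t l ih =>
    intro tot d
    by_cases h : t.1 ≤ r
    · by_cases hL : t.2 = L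
      · simp [h, hL, ih]
        ring
      · simp [h, hL, ih, PySem.Dict.getD_insert, Ne.symm hL]
    · simp [h, ih]

-- below-threshold count splits into label-equal and label-different parts
theorem countP_split (r L : Int) (l : List (Int × Int)) :
    l.countP (fun t => decide (t.1 ≤ r))
      = l.countP (fun t => decide (t.1 ≤ r ∧ t.2 = L))
        + l.countP (fun t => decide (t.1 ≤ r ∧ t.2 ≠ L)) := by
  induction l with
  | nil => simp
  | cons t l ih =>
    by_cases h : t.1 ≤ r
    · by_cases hL : t.2 = L <;> simp [h, hL, ih] <;> omega
    · simp [h, ih]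

-- ===== VERDICT (by name: the statement is the Claim_ definition above) =====
theorem count_spec : Claim_equal_count := by
  intro tupleSet refTuple mode L_t _
  show count tupleSet refTuple mode L_t = count_alt tupleSet refTuple mode L_t
  simp only [count, count_alt]
  rw [PySem.List.foldl_pyRange_zero_pyGetD' tupleSet (0, 0)
        (fun j t => if t.1 ≤ refTuple.1 ∧ t.2 = L_t then j + 1 else j) 0,
      PySem.List.foldl_pyRange_zero_pyGetD' tupleSet (0, 0)
        (fun j t => if t.1 ≤ refTuple.1 ∧ t.2 ≠ L_t then j + 1 else j) 0]
  by_cases h0 : mode = 0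
  · simp only [h0, if_true]
    rw [foldA_count, foldB_snd refTuple.1 L_t tupleSet 0 PySem.Dict.empty]
    simp
  · by_cases h1 : mode = 1
    · rw [if_neg h0, if_neg h0]
      subst h1
      rw [if_pos rfl, if_pos rfl]
      rw [foldA_count, foldB_fst refTuple.1 tupleSet 0 PySem.Dict.empty,
          foldB_snd refTuple.1 L_t tupleSet 0 PySem.Dict.empty,
          countP_split refTuple.1 L_t tupleSet]
      simp
    · simp [h0, h1]
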